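-- pv_equiv track=rewrite | github.com/chlendyd7/Algorithm | 리뉴얼/2024/프로그래머스/12/fifth/31/new/할인 행사.py | solution
-- ===== SOURCE A (Python) =====
-- from collections import Counter
--
-- def solution(want, number, discount):
--     want_dict = {want[i]: number[i] for i in range(len(want))}
--
--     match_count = 0
--
--     for i in range(len(discount) - 9):
--         current_window = discount[i:i+10]
--         current_count = Counter(current_window)
--
--         if all(current_count[product] >= want_dict[product] for product in want_dict):
--             match_count += 1
--
--     return match_count
-- ===== SOURCE B (Python) =====
-- def solution(want, number, discount):
--     want_dict = {}
--     for i in range(len(want)):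
--         want_dict[want[i]] = number[i]
--     if len(discount) < 10:
--         return 0
--     counts = {}
--     for s in discount[:10]:
--         counts[s] = counts.get(s, 0) + 1
--     match_count = 1 if all(counts.get(p, 0) >= n for p, n in want_dict.items()) else 0
--     for i in range(10, len(discount)):
--         out = discount[i - 10]
--         counts[out] = counts.get(out, 0) - 1
--         new = discount[i]
--         counts[new] = counts.get(new, 0) + 1
--         if all(counts.get(p, 0) >= n for p, n in want_dict.items()):
--             match_count += 1
--     return match_count
-- ===== Notes on version B (the rewrite author's own statement) =====
-- stated objective: alternative
-- what changed: Instead of re-slicing and re-counting a fresh Counter for every length-10 window, B maintains one sliding count dictionary, updating it by one decrement and one increment per shift.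
import Mathlib
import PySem

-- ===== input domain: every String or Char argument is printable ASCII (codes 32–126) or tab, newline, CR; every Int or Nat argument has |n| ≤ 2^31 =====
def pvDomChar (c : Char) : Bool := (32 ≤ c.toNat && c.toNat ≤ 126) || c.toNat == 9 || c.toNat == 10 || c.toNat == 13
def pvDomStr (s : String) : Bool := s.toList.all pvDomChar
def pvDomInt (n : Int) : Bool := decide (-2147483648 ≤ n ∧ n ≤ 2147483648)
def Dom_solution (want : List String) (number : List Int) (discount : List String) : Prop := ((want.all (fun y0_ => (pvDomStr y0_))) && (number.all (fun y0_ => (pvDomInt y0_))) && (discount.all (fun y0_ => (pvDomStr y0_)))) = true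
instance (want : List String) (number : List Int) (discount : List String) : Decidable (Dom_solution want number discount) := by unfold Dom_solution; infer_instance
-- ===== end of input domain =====

-- B maintains one sliding count dictionary (one decrement + one increment per shift) instead of
-- re-slicing and re-counting a fresh Counter for every window; alternative decomposition, same cost class.

-- ===== PORT A =====
-- A: want_dict by dict comprehension over indices; per window, Counter(discount[i:i+10]) and an all() over want_dict's keys.
def solution (want : List String) (number : List Int) (discount : List String) : Int :=
  let wd : PySem.Dict String Int :=
    (PySem.List.pyRange 0 (want.length : Int)).foldl
      (fun d i => d.insert ((PySem.List.pyGet? want i).getD "") ((PySem.List.pyGet? number i).getD 0))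
      PySem.Dict.empty
  (PySem.List.pyRange 0 ((discount.length : Int) - 9)).foldl
    (fun mc i =>
      let win := PySem.List.slice discount (some i) (some (i + 10))
      let cnt := PySem.Dict.counter win
      if wd.keys.all (fun p => cnt.getD p 0 ≥ wd.getD p 0) then mc + 1 else mc)
    0

-- ===== PORT B =====
-- B-side helper: the check `all(counts.get(p, 0) >= n for p, n in want_dict.items())` (used twice in Source B)
def altCheck (wd : PySem.Dict String Int) (counts : PySem.Dict String Int) : Bool :=
  wd.items.all (fun p => counts.getD p.1 0 ≥ p.2)

-- B-side helper: one iteration of the sliding loop body (`for i in range(10, len(discount))` in Source B)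
def altStep (wd : PySem.Dict String Int) (discount : List String)
    (st : PySem.Dict String Int × Int) (i : Int) : PySem.Dict String Int × Int :=
  let out := (PySem.List.pyGet? discount (i - 10)).getD ""
  let c1 := st.1.insert out (st.1.getD out 0 - 1)
  let nw := (PySem.List.pyGet? discount i).getD ""
  let c2 := c1.insert nw (c1.getD nw 0 + 1)
  (c2, if altCheck wd c2 then st.2 + 1 else st.2)

def solution_alt (want : List String) (number : List Int) (discount : List String) : Int :=
  let wd : PySem.Dict String Int :=
    (PySem.List.pyRange 0 (want.length : Int)).foldl
      (fun d i => d.insert ((PySem.List.pyGet? want i).getD "") ((PySem.List.pyGet? number i).getD 0))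
      PySem.Dict.empty
  if discount.length < 10 then 0
  else
    let counts0 : PySem.Dict String Int :=
      (PySem.List.slice discount none (some 10)).foldl
        (fun c s => c.insert s (c.getD s 0 + 1)) PySem.Dict.empty
    let m0 : Int := if altCheck wd counts0 then 1 else 0
    ((PySem.List.pyRange 10 (discount.length : Int)).foldl (altStep wd discount) (counts0, m0)).2

-- ===== PRECONDITION & SPEC =====
-- Pre_ excludes exactly the inputs on which A raises IndexError (number[i] while building want_dict);
-- B raises the same IndexError there.
def Pre_solution (want : List String) (number : List Int) (discount : List String) : Prop :=
  want.length ≤ number.length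
instance (want : List String) (number : List Int) (discount : List String) : Decidable (Pre_solution want number discount) := by unfold Pre_solution; infer_instance
def pvWitness_solution : List String × List Int × List String :=
  (["a"], [1], ["a", "a", "a", "a", "a", "a", "a", "a", "a", "a"])

def Spec_solution (want : List String) (number : List Int) (discount : List String) (out : Int) : Prop := out = solution_alt want number discount
instance (want : List String) (number : List Int) (discount : List String) (out : Int) : Decidable (Spec_solution want number discount out) := by unfold Spec_solution; infer_instance

-- ===== CLAIM (what is proved, stated in full; the proofs are below) =====
def Claim_equal_solution : Prop := ∀ (want : List String) (number : List Int) (discount : List String), Dom_solution want number discount → Pre_solution want number discount → Spec_solution want number discount (solution want number discount)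

-- ===== LEMMAS AND PROOFS =====

theorem all_congr_mem' {α : Type} {l : List α} {f g : α → Bool}
    (h : ∀ x ∈ l, f x = g x) : l.all f = l.all g := by
  induction l with
  | nil => rfl
  | cons x xs ih =>
    simp only [List.all_cons, h x (by simp), ih (fun y hy => h y (by simp [hy]))]

-- the window check, phrased on the plain count of the window list
def winChk (wd : PySem.Dict String Int) (win : List String) : Bool :=
  wd.items.all (fun p => decide (((win.count p.1 : Nat) : Int) ≥ p.2))

-- the index-loop dict build is the fold of insert over the zipped pairs (under Pre_)
theorem wd_eq (want : List String) (number : List Int) (h : want.length ≤ number.length)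
    (d : PySem.Dict String Int) :
    (PySem.List.pyRange 0 (want.length : Int)).foldl
      (fun d i => d.insert ((PySem.List.pyGet? want i).getD "") ((PySem.List.pyGet? number i).getD 0)) d
    = (want.zip number).foldl (fun d p => d.insert p.1 p.2) d := by
  rw [PySem.List.pyRange_zero_natCast, List.foldl_map]
  simp only [PySem.List.pyGet?_natCast]
  induction want generalizing number d with
  | nil => simp
  | cons x xs ih =>
    cases number with
    | nil => simp at h
    | cons y ys =>
      simp only [List.length_cons]
      rw [List.range_succ_eq_map, List.foldl_cons, List.foldl_map]
      simp only [List.getElem?_cons_zero, Option.getD_some, Nat.succ_eq_add_one,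
        List.getElem?_cons_succ, List.zip_cons_cons, List.foldl_cons]
      exact ih ys (by simpa using h) _

-- A's per-window condition is winChk of the window, once the dict's keys are nodup
theorem keys_all_eq_winChk (wd : PySem.Dict String Int) (hnd : wd.keys.Nodup) (win : List String) :
    (wd.keys.all (fun p => (PySem.Dict.counter win).getD p 0 ≥ wd.getD p 0)) = winChk wd win := by
  unfold winChk
  have : wd.keys = wd.items.map (·.1) := rfl
  rw [this, List.all_map]
  refine all_congr_mem' (fun p hp => ?_)
  have hget : wd.getD p.1 0 = p.2 := PySem.Dict.getD_of_mem_items wd (by exact hp) hnd 0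
  simp [Function.comp, PySem.Dict.getD_counter, hget]

-- B's check agrees with winChk when the counts dictionary holds the window's counts
theorem altCheck_eq_winChk (wd c : PySem.Dict String Int) (win : List String)
    (h : ∀ p : String, c.getD p 0 = ((win.count p : Nat) : Int)) :
    altCheck wd c = winChk wd win := by
  unfold altCheck winChk
  exact all_congr_mem' (fun p _ => by rw [h p.1])

-- pointwise effect on lookups of the decrement-then-increment insert pair in altStep
theorem getD_shift (c : PySem.Dict String Int) (a b p : String) :
    ((c.insert a (c.getD a 0 - 1)).insert b ((c.insert a (c.getD a 0 - 1)).getD b 0 + 1)).getD p 0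
      = c.getD p 0 - (if a = p then 1 else 0) + (if b = p then 1 else 0) := by
  rw [PySem.Dict.getD_insert]
  by_cases pb : p = b
  · subst pb
    rw [if_pos rfl, PySem.Dict.getD_insert]
    by_cases pa : p = a
    · subst pa; simp
    · rw [if_neg pa, if_pos rfl, if_neg (fun h => pa h.symm)]; ring
  · rw [if_neg pb, PySem.Dict.getD_insert]
    by_cases pa : p = a
    · subst pa; rw [if_pos rfl, if_pos rfl, if_neg (fun h => pb h.symm)]; ring
    · rw [if_neg pa, if_neg (fun h => pa h.symm), if_neg (fun h => pb h.symm)]; ring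

-- shifting the window by one: counts move by one decrement and one increment
theorem window_shift (discount : List String) (t : Nat) (h : 10 + t < discount.length) (p : String) :
    (((discount.drop (t+1)).take 10).count p : Int)
      = (((discount.drop t).take 10).count p : Int)
        - (if discount[t]'(by omega) = p then 1 else 0)
        + (if discount[10+t]'(by omega) = p then 1 else 0) := by
  have ht : t < discount.length := by omega
  have h1 : discount.drop t = discount[t] :: discount.drop (t+1) := List.drop_eq_getElem_cons ht
  have h2 : (discount.drop (t+1)).take 10 = (discount.drop (t+1)).take 9 ++ [discount[10+t]'(by omega)] := by
    have h9 : (discount.drop (t+1))[9]? = some (discount[10+t]'(by omega)) := by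
      rw [List.getElem?_drop]
      have he : t+1+9 = 10+t := by omega
      rw [he, List.getElem?_eq_getElem (by omega)]
    calc (discount.drop (t+1)).take 10 = (discount.drop (t+1)).take (9+1) := by norm_num
      _ = (discount.drop (t+1)).take 9 ++ (discount.drop (t+1))[9]?.toList := List.take_add_one
      _ = _ := by rw [h9]; rfl
  have h3 : (discount.drop t).take 10 = discount[t] :: (discount.drop (t+1)).take 9 := by
    rw [h1]; rfl
  rw [h2, h3]
  simp only [List.count_append, List.count_cons, List.count_nil, beq_iff_eq]
  by_cases e1 : discount[t] = p <;> by_cases e2 : discount[10+t]'(by omega) = p <;>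
    simp [e1, e2]

-- the sliding-loop invariant: counts hold the current window's counts, the accumulator counts matches so far
theorem slide_inv (wd : PySem.Dict String Int) (discount : List String) (hL : 10 ≤ discount.length)
    (t : Nat) (ht : t ≤ discount.length - 10) :
    ∃ c : PySem.Dict String Int,
      (PySem.List.pyRange 10 ((10 + t : Nat) : Int)).foldl (altStep wd discount)
          (PySem.Dict.counter (discount.take 10),
           if altCheck wd (PySem.Dict.counter (discount.take 10)) then 1 else 0)
        = (c, ((List.range (t+1)).countP (fun j => winChk wd ((discount.drop j).take 10)) : Int))
      ∧ ∀ p : String, c.getD p 0 = (((discount.drop t).take 10).count p : Nat) := by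
  induction t with
  | zero =>
    refine ⟨PySem.Dict.counter (discount.take 10), ?_, fun p => by
      simp [PySem.Dict.getD_counter]⟩
    have he : PySem.List.pyRange 10 ((10:Nat):Int) = [] := by decide
    have he' : PySem.List.pyRange 10 ((10+0:Nat):Int) = [] := by norm_num [he]
    rw [he', List.foldl_nil]
    have hc : altCheck wd (PySem.Dict.counter (discount.take 10)) = winChk wd ((discount.drop 0).take 10) := by
      refine altCheck_eq_winChk _ _ _ (fun p => ?_)
      simp [PySem.Dict.getD_counter]
    rw [hc]
    by_cases h0 : winChk wd ((discount.drop 0).take 10) = true <;> simp [h0]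
  | succ t ih =>
    obtain ⟨c, hfold, hcnt⟩ := ih (by omega)
    have hlt : 10 + t < discount.length := by omega
    have hcast : ((10 + (t+1) : Nat) : Int) = ((10 + t : Nat) : Int) + 1 := by push_cast; ring
    have hrange : PySem.List.pyRange 10 ((10 + (t+1) : Nat) : Int)
        = PySem.List.pyRange 10 ((10 + t : Nat) : Int) ++ [((10 + t : Nat) : Int)] := by
      rw [hcast]; exact PySem.List.pyRange_one_succ_right (by push_cast; omega)
    rw [hrange, List.foldl_append, hfold, List.foldl_cons, List.foldl_nil]
    -- evaluate one step
    have hout : (PySem.List.pyGet? discount (((10 + t : Nat) : Int) - 10)).getD ""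
        = discount[t]'(by omega) := by
      have : ((10 + t : Nat) : Int) - 10 = ((t : Nat) : Int) := by push_cast; ring
      rw [this, PySem.List.pyGet?_natCast, List.getElem?_eq_getElem (by omega)]; rfl
    have hnw : (PySem.List.pyGet? discount ((10 + t : Nat) : Int)).getD ""
        = discount[10+t]'(by omega) := by
      rw [PySem.List.pyGet?_natCast, List.getElem?_eq_getElem (by omega)]; rfl
    set out := discount[t]'(by omega) with hout_def
    set nw := discount[10+t]'(by omega) with hnw_def
    set c2 := (c.insert out (c.getD out 0 - 1)).insert nw
        ((c.insert out (c.getD out 0 - 1)).getD nw 0 + 1) with hc2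
    have hc2cnt : ∀ p : String, c2.getD p 0 = (((discount.drop (t+1)).take 10).count p : Nat) := by
      intro p
      rw [window_shift discount t hlt p, hc2, getD_shift, hcnt p]
    refine ⟨c2, ?_, hc2cnt⟩
    unfold altStep
    simp only [hout, hnw, ← hc2]
    have hchk : altCheck wd c2 = winChk wd ((discount.drop (t+1)).take 10) :=
      altCheck_eq_winChk _ _ _ hc2cnt
    rw [hchk]
    have hstepP : ((List.range (t+1+1)).countP (fun j => winChk wd ((discount.drop j).take 10)) : Int)
        = ((List.range (t+1)).countP (fun j => winChk wd ((discount.drop j).take 10)) : Int)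
          + (if winChk wd ((discount.drop (t+1)).take 10) then 1 else 0) := by
      rw [List.range_succ, List.countP_append]
      by_cases hw : winChk wd ((discount.drop (t+1)).take 10) = true <;> simp [hw]
    by_cases hw : winChk wd ((discount.drop (t+1)).take 10) = true <;>
      simp [hw] at hstepP ⊢ <;> omega

-- ===== VERDICT (by name: the statement is the Claim_ definition above) =====
theorem solution_spec : Claim_equal_solution := by
  intro want number discount _ hpre
  unfold Spec_solution solution solution_alt
  rw [wd_eq want number hpre]
  set wd : PySem.Dict String Int :=
    (want.zip number).foldl (fun d p => d.insert p.1 p.2) PySem.Dict.empty with hwd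
  have hnd : wd.keys.Nodup := by
    rw [hwd]
    exact PySem.Dict.nodup_keys_foldl_insert_key (want.zip number)
      (fun (p : String × Int) => p.1) (fun (_ : PySem.Dict String Int) (p : String × Int) => p.2)
      PySem.Dict.empty PySem.Dict.nodup_keys_empty
  by_cases hL : discount.length < 10
  · rw [if_pos hL]
    have hempty : PySem.List.pyRange 0 ((discount.length : Int) - 9) = [] := by
      rw [List.eq_nil_iff_forall_not_mem]
      intro x hx
      rw [PySem.List.mem_pyRange_one] at hx
      omega
    rw [hempty]; rfl
  · have hL10 : 10 ≤ discount.length := by omega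
    rw [if_neg (by omega)]
    -- A's side: a countP over the window starts
    have hA : (PySem.List.pyRange 0 ((discount.length : Int) - 9)).foldl
        (fun mc i =>
          if wd.keys.all (fun p =>
              (PySem.Dict.counter (PySem.List.slice discount (some i) (some (i + 10)))).getD p 0
                ≥ wd.getD p 0)
          then mc + 1 else mc) 0
        = ((List.range (discount.length - 9)).countP
            (fun j => winChk wd ((discount.drop j).take 10)) : Int) := by
      have hcast : (discount.length : Int) - 9 = ((discount.length - 9 : Nat) : Int) := by omega
      rw [hcast, PySem.List.pyRange_zero_natCast, List.foldl_map]
      have hbody : ∀ (mc : Int) (j : Nat),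
          (if wd.keys.all (fun p =>
              (PySem.Dict.counter (PySem.List.slice discount (some (j:Int)) (some ((j:Int) + 10)))).getD p 0
                ≥ wd.getD p 0)
           then mc + 1 else mc)
          = (if winChk wd ((discount.drop j).take 10) then mc + 1 else mc) := by
        intro mc j
        have hsl : PySem.List.slice discount (some (j:Int)) (some ((j:Int) + 10))
            = (discount.drop j).take 10 := by
          have : ((j:Int) + 10) = ((j:Int) + ((10:Nat):Int)) := by norm_num
          rw [this, PySem.List.slice_natCast_add]
        rw [hsl, keys_all_eq_winChk wd hnd]
      simp only [hbody]
      rw [PySem.List.foldl_count_if (fun j => winChk wd ((discount.drop j).take 10))]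
      simp
    rw [hA]
    -- B's side: the sliding loop
    obtain ⟨c, hfold, _⟩ := slide_inv wd discount hL10 (discount.length - 10) (le_refl _)
    have hten : ((10 + (discount.length - 10) : Nat) : Int) = (discount.length : Int) := by omega
    rw [hten] at hfold
    have hcnt0 : (PySem.List.slice discount none (some 10)).foldl
        (fun c s => c.insert s (c.getD s 0 + 1)) PySem.Dict.empty
        = PySem.Dict.counter (discount.take 10) := by
      rw [PySem.List.slice_to discount (by norm_num : (0:Int) ≤ 10),
        PySem.Dict.foldl_insert_getD_add_one_eq_counter]
      simp
    rw [hcnt0]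
    have hco : discount.length - 10 + 1 = discount.length - 9 := by omega
    rw [hco] at hfold
    show ((List.range (discount.length - 9)).countP (fun j => winChk wd ((discount.drop j).take 10)) : Int)
        = (List.foldl (altStep wd discount)
            (PySem.Dict.counter (discount.take 10),
              if altCheck wd (PySem.Dict.counter (discount.take 10)) = true then 1 else 0)
            (PySem.List.pyRange 10 (discount.length : Int))).2
    rw [hfold]
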